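/-
  jsmn_s.bin: `jsmn_parse`, the check after the main loop (100587H – 1005C1H, 17 instructions, one loop, head 10059BH):
  `if (tokens != NULL) for (i = toknext - 1; i >= 0; i--) if (tokens[i] is open) return JSMN_ERROR_PART;` = `Jsmn.finish` (with `scanOpen`).
  The S twin of Prog/Jsmn/D/ParseFinal.lean (20-byte tokens: `movsxd rdx, eax ; lea rdx, [rdx+rdx*4] ; lea rdx, [r13+rdx*4]`).
-/
import Prog.Jsmn.S.ScanLemmas

namespace X86
namespace J6
namespace S
open X86.User (CodeAt RegsKept Span FlagsOK Layout toNat_add_ofNat toNat_ofNat_lt' add_ofNat_add)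
open Jsmn JsmnSBytes

set_option maxRecDepth 100000
set_option maxHeartbeats 4000000
set_option linter.unusedSimpArgs false
set_option linter.unusedVariables false

/-- The invariant at the head of the scan (10059BH): `eax = j - 1`, no open token at `j` or above. -/
structure FinInv (c : PCtx) (n : User.Layout) (v0 : User.State) (s : St) (ts : Tokens) (j : Nat) (v : User.State) : Prop where
  rip : v.rip = 0x10059b
  core : FrameCore c n v0 v s.p s.toks
  r12 : v.reg .r12 = UInt64.ofNat (u32 s.count)
  rax : v.reg .rax = UInt64.ofNat (u32 ((j : Int) - 1))
  jle : j ≤ c.numTokens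
  scan : scanOpen ts (i32 ((s.p.toknext : Int) - 1) + 1).toNat = scanOpen ts j

/-- One trip round the scan: return (`count`, or JSMN_ERROR_PART at an open token), or on down. -/
theorem fin_body {n : User.Layout} {c : PCtx} {v0 v : User.State} {s : St} {ts : Tokens} (hts : s.toks = some ts)
    (hinv : Inv Config.strictLinks s.p s.toks c.numTokens) (j : Nat) (hi : FinInv c n v0 s ts j v) :
    Reach n v (fun v' => AtRet c n v0 v' (finish s) s ∨ ∃ j', j' < j ∧ FinInv c n v0 s ts j' v') := by
  obtain ⟨p, toks, count⟩ := s
  dsimp only at hts hinv hi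
  subst hts
  have hfc := hi.core
  have htl := hfc.tlen_some
  have hcode := hfc.code
  have henv := hfc.entry.pre.env
  have hcall := hfc.entry.pre.call
  have hW := hfc.entry.pre.toksW
  v3_open hi henv hcall hW
  j6_bin
  obtain ⟨htb, hlen, htoks⟩ := hi_core_toksArg
  simp only [PCtx.tlen, htl, dataWins] at *
  have hR := hfc.entry.pre.env.toksR.resolve_left htb
  v3_open hR
  j6_bin
  have htinv := hinv.toks ts rfl
  have hsmall := htinv.small
  have htn := htinv.toknext
  have hi32 := i32_pred (k := p.toknext) (by omega)
  have hucnt := u32_lt count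
  rcases j with _ | j
  · -- nothing left to look at: return count
    rw [u32_pred_zero] at hi_rax
    v3_walk hcode hcall.fetch [] until [0x100325]
    have hfin : finish ⟨p, some ts, count⟩ = count := by
      simp only [finish]; split
      · rfl
      · rw [hi_scan]; rfl
    refine Reach.done (Or.inl ⟨by simp, hfc.of_kept (by simp) (by v3_kept), ?_⟩)
    rw [hfin]; v3_regnorm; rw [hi_r12]
    v3_omega
  · have hj32 : j < 2147483648 := by omega
    rw [u32_pred_succ j (by omega)] at hi_rax
    have ht := htoks.getD j (by omega)
    rw [tokAddr20] at ht
    obtain ⟨hrs, -, -⟩ := ht.start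
    obtain ⟨hre, -, -⟩ := ht.«end»
    have hopen := isOpen_raw ht.start ht.«end»
    rw [hrs, hre] at hopen
    have hu1 := u32_lt (ts.getD j default).start
    have hu2 := u32_lt (ts.getD j default).«end»
    have hsx := Word.sext32_ofNat_of_lt j hj32
    have hlea := lea20_ofNat j (by omega)
    have hpred : u32 ((j : Int) - 1) = (j + 4294967295) % 4294967296 := by unfold u32; omega
    have e1 : ((233 : Nat) == 235) = false := by decide
    have e2 : ((233 : UInt8) == 235) = false := by decide
    have e3 : ((233 : UInt64) == 235) = false := by decide
    v3_walk hcode hcall.fetch [hsx, hlea, e1, e2, e3] until [0x100325, 0x10059b]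
    · -- start == -1: not open, go on down
      have hno : ¬ (ts.getD j default).isOpen = true := by rw [hopen]; intro h; apply h.1; v3_omega
      refine Reach.done (Or.inr ⟨j, by omega, by simp, hfc.of_kept (by simp) (by v3_kept), by v3_regnorm; exact hi_r12,
        ?_, by omega, by rw [hi_scan, scanOpen_succ_closed hno]⟩)
      v3_regnorm; rw [hpred]; v3_omega
    · -- end != -1: not open, go on down
      have hno : ¬ (ts.getD j default).isOpen = true := by rw [hopen]; intro h; apply hbr_1005b9; rw [h.2]; rfl
      refine Reach.done (Or.inr ⟨j, by omega, by simp, hfc.of_kept (by simp) (by v3_kept), by v3_regnorm; exact hi_r12,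
        ?_, by omega, by rw [hi_scan, scanOpen_succ_closed hno]⟩)
      v3_regnorm; rw [hpred]; v3_omega
    · -- an open token: JSMN_ERROR_PART
      have hyes : (ts.getD j default).isOpen = true := by rw [hopen]; constructor <;> v3_omega
      have hfin : finish ⟨p, some ts, count⟩ = JSMN_ERROR_PART := by
        have hsc : scanOpen ts (i32 ((p.toknext : Int) - 1) + 1).toNat = some j := by rw [hi_scan, scanOpen_succ_open hyes]
        simp only [finish]; split
        · exfalso
          have h0 : p.toknext = 0 := by omega
          rw [h0] at hsc
          exact absurd hsc (by simp [scanOpen, i32])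
        · rw [hsc]
      refine Reach.done (Or.inl ⟨by simp, hfc.of_kept (by simp) (by v3_kept), ?_⟩)
      rw [hfin]; v3_regnorm; rfl

/-- **100587H → 100325H: the check after the main loop computes `Jsmn.finish`.** -/
theorem final_reach {n : User.Layout} {c : PCtx} {v0 v : User.State} {s : St} (h : AtFinal c n v0 v s) :
    Reach n v (fun v' => AtRet c n v0 v' (finish s) s) := by
  obtain ⟨hrip, hf⟩ := h
  obtain ⟨p, toks, count⟩ := s
  have hfc := hf.core
  have hinv := hf.inv
  have hcode := hfc.code
  have henv := hfc.entry.pre.env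
  have hcall := hfc.entry.pre.call
  have hW := hfc.entry.pre.toksW
  v3_open hf henv hcall hW
  j6_bin
  have hucnt := u32_lt count
  cases toks with
  | none =>
    -- counting mode: return count
    have htb : c.tb = 0 := hf_core_toksArg
    v3_walk hcode hcall.fetch [] until [0x100325]
    refine Reach.done ⟨by simp, hfc.of_kept (by simp) (by v3_kept), ?_⟩
    simp only [finish]; v3_regnorm; rw [hf_r12]
    v3_omega
  | some ts =>
    have htl := hfc.tlen_some
    obtain ⟨htb, hlen, htoks⟩ := hf_core_toksArg
    simp only [PCtx.tlen, htl, dataWins] at *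
    have htinv := hinv.toks ts rfl
    have hsmall := htinv.small
    have htn := htinv.toknext
    v3_walk hcode hcall.fetch [] until [0x10059b]
    refine Reach.loopOn (Inv := FinInv c n v0 ⟨p, some ts, count⟩ ts) (fun k v hi => fin_body rfl hinv k hi) p.toknext _ ?_
    have hi32 := i32_pred (k := p.toknext) (by omega)
    refine ⟨by simp, hfc.of_kept (by simp) (by v3_kept), by v3_regnorm; exact hf_r12, ?_, htn, ?_⟩
    · v3_regnorm
      have : u32 ((p.toknext : Int) - 1) = (p.toknext + 4294967295) % 4294967296 := by unfold u32; omega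
      rw [this]; v3_omega
    · dsimp only
      have e : ((p.toknext : Int) - 1 + 1).toNat = p.toknext := by omega
      rw [hi32, e]

/-- The check after the main loop, as the region statement of Prog/Jsmn/S/ParseInv.lean. -/
theorem final_spec (n : User.Layout) : FinalSpec n := fun _ _ _ _ h => final_reach h

end S
end J6
end X86
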